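-- pv_equiv track=rewrite | github.com/samucj73/Test-rouket | Domina03.py | obter_vizinhos_fisicos
-- ===== SOURCE A (Python) =====
-- ROULETTE_PHYSICAL_LAYOUT = [
--     [1, 4, 7, 10, 13, 16, 19, 22, 25, 28, 31, 34],
--     [2, 5, 8, 11, 14, 17, 20, 23, 26, 29, 32, 35],
--     [3, 6, 9, 12, 15, 18, 21, 24, 27, 30, 33, 36]
-- ]
--
-- def obter_vizinhos_fisicos(numero):
--     """Retorna vizinhos físicos na mesa"""
--     if numero == 0:
--         return [32, 15, 19, 4, 21, 2, 25]
--
--     vizinhos = set()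
--
--     for col_idx, coluna in enumerate(ROULETTE_PHYSICAL_LAYOUT):
--         if numero in coluna:
--             num_idx = coluna.index(numero)
--
--             if num_idx > 0:
--                 vizinhos.add(coluna[num_idx - 1])
--             if num_idx < len(coluna) - 1:
--                 vizinhos.add(coluna[num_idx + 1])
--
--             if col_idx > 0:
--                 if num_idx < len(ROULETTE_PHYSICAL_LAYOUT[col_idx - 1]):
--                     vizinhos.add(ROULETTE_PHYSICAL_LAYOUT[col_idx - 1][num_idx])
--             if col_idx < 2:
--                 if num_idx < len(ROULETTE_PHYSICAL_LAYOUT[col_idx + 1]):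
--                     vizinhos.add(ROULETTE_PHYSICAL_LAYOUT[col_idx + 1][num_idx])
--
--     return list(vizinhos)
-- ===== SOURCE B (Python) =====
-- def obter_vizinhos_fisicos(numero):
--     """Retorna vizinhos fisicos na mesa"""
--     if numero == 0:
--         return [32, 15, 19, 4, 21, 2, 25]
--     if not (1 <= numero <= 36):
--         return []
--     row = (numero - 1) % 3
--     idx = (numero - 1) // 3
--     vizinhos = set()
--     if idx > 0:
--         vizinhos.add(numero - 3)
--     if idx < 11:
--         vizinhos.add(numero + 3)
--     if row > 0:
--         vizinhos.add(numero - 1)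
--     if row < 2:
--         vizinhos.add(numero + 1)
--     return list(vizinhos)
-- ===== Notes on version B (the rewrite author's own statement) =====
-- stated objective: simpler
-- what changed: B replaces A's scan over the three layout columns (membership test plus list.index per column) with direct arithmetic on the grid position row=(numero-1)%3, idx=(numero-1)//3, adding the up-to-four neighbors by formula.
import Mathlib
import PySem

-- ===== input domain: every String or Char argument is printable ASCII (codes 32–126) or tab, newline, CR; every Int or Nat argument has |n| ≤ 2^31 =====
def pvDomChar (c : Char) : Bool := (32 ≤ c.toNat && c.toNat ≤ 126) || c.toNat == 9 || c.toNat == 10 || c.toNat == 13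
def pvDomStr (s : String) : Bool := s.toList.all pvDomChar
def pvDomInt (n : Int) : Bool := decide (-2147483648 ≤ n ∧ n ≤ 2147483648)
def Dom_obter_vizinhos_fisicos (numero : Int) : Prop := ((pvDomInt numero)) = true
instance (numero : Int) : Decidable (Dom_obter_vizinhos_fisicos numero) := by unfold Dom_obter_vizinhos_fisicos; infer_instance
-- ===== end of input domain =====

-- B computes the neighbors of 1..36 by grid arithmetic instead of A's scan over the three layout columns; same return value everywhere.

-- Exact model of CPython's `list(set(...))` for the sets both programs build: at most 4
-- non-negative small ints (hash(n) = n), so the hash table keeps its initial 8 slots and —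
-- the elements here being pairwise distinct mod 8 — iteration order is ascending in (v mod 8).
def pvListOfSmallIntSet (s : PySem.Set Int) : List Int :=
  PySem.List.sorted s (fun v => PySem.Int.mod v 8) false

-- ===== PORT A =====
def pvLayout : List (List Int) :=
  [[1, 4, 7, 10, 13, 16, 19, 22, 25, 28, 31, 34],
   [2, 5, 8, 11, 14, 17, 20, 23, 26, 29, 32, 35],
   [3, 6, 9, 12, 15, 18, 21, 24, 27, 30, 33, 36]]

def obter_vizinhos_fisicos (numero : Int) : List Int :=
  if numero = 0 then [32, 15, 19, 4, 21, 2, 25]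
  else
    let vizinhos : PySem.Set Int :=
      (PySem.List.enumerate pvLayout).foldl (fun viz p =>
        let col_idx := p.1
        let coluna := p.2
        if numero ∈ coluna then
          match PySem.List.index? coluna numero with
          | none => viz  -- unreachable: membership was just checked
          | some num_idx =>
            let viz := if num_idx > 0 then
                PySem.Set.add viz (PySem.List.pyGetD coluna ((num_idx : Int) - 1) 0) else viz
            let viz := if num_idx < coluna.length - 1 then
                PySem.Set.add viz (PySem.List.pyGetD coluna ((num_idx : Int) + 1) 0) else viz
            let viz := if col_idx > 0 then
                (let prev := PySem.List.pyGetD pvLayout (col_idx - 1) []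
                 if num_idx < prev.length then
                   PySem.Set.add viz (PySem.List.pyGetD prev (num_idx : Int) 0) else viz)
              else viz
            let viz := if col_idx < 2 then
                (let next := PySem.List.pyGetD pvLayout (col_idx + 1) []
                 if num_idx < next.length then
                   PySem.Set.add viz (PySem.List.pyGetD next (num_idx : Int) 0) else viz)
              else viz
            viz
        else viz) PySem.Set.empty
    pvListOfSmallIntSet vizinhos

-- ===== PORT B =====
def obter_vizinhos_fisicos_alt (numero : Int) : List Int :=
  if numero = 0 then [32, 15, 19, 4, 21, 2, 25]
  else if ¬ (1 ≤ numero ∧ numero ≤ 36) then []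
  else
    let row := PySem.Int.mod (numero - 1) 3
    let idx := PySem.Int.floordiv (numero - 1) 3
    let vizinhos : PySem.Set Int := PySem.Set.empty
    let vizinhos := if idx > 0 then PySem.Set.add vizinhos (numero - 3) else vizinhos
    let vizinhos := if idx < 11 then PySem.Set.add vizinhos (numero + 3) else vizinhos
    let vizinhos := if row > 0 then PySem.Set.add vizinhos (numero - 1) else vizinhos
    let vizinhos := if row < 2 then PySem.Set.add vizinhos (numero + 1) else vizinhos
    pvListOfSmallIntSet vizinhos

-- ===== PRECONDITION & SPEC =====
def Spec_obter_vizinhos_fisicos (numero : Int) (out : List Int) : Prop := out = obter_vizinhos_fisicos_alt numero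
instance (numero : Int) (out : List Int) : Decidable (Spec_obter_vizinhos_fisicos numero out) := by unfold Spec_obter_vizinhos_fisicos; infer_instance

-- ===== CLAIM (what is proved, stated in full; the proofs are below) =====
def Claim_equal_obter_vizinhos_fisicos : Prop := ∀ (numero : Int), Dom_obter_vizinhos_fisicos numero → Spec_obter_vizinhos_fisicos numero (obter_vizinhos_fisicos numero)

-- ===== LEMMAS AND PROOFS =====

-- Outside 0..36 both programs return the empty list.
theorem pv_out_of_range (numero : Int) (h : ¬ (0 ≤ numero ∧ numero ≤ 36)) :
    obter_vizinhos_fisicos numero = [] ∧ obter_vizinhos_fisicos_alt numero = [] := by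
  have h0 : numero ≠ 0 := by omega
  have h1 : numero ∉ ([1, 4, 7, 10, 13, 16, 19, 22, 25, 28, 31, 34] : List Int) := by
    simp; omega
  have h2 : numero ∉ ([2, 5, 8, 11, 14, 17, 20, 23, 26, 29, 32, 35] : List Int) := by
    simp; omega
  have h3 : numero ∉ ([3, 6, 9, 12, 15, 18, 21, 24, 27, 30, 33, 36] : List Int) := by
    simp; omega
  constructor
  · simp [obter_vizinhos_fisicos, pvLayout, PySem.List.enumerate_cons,
      PySem.List.enumerate_nil, List.foldl, h0, h1, h2, h3, pvListOfSmallIntSet,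
      PySem.List.sorted, PySem.Set.empty]
  · have hb : ¬ (1 ≤ numero ∧ numero ≤ 36) := by omega
    simp [obter_vizinhos_fisicos_alt, h0, hb]

-- ===== VERDICT (by name: the statement is the Claim_ definition above) =====
theorem obter_vizinhos_fisicos_spec : Claim_equal_obter_vizinhos_fisicos := by
  intro numero _
  unfold Spec_obter_vizinhos_fisicos
  by_cases h : 0 ≤ numero ∧ numero ≤ 36
  · obtain ⟨h1, h2⟩ := h
    interval_cases numero <;> decide
  · have := pv_out_of_range numero h
    rw [this.1, this.2]
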